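-- pv_equiv track=rewrite | github.com/kenneys-bot/GeoLayoutLM_for_CORD | geolayoutlm/preprocess/sroie_el/preprocess_to_funsd.py | find_address_entities
-- ===== SOURCE A (Python) =====
-- def find_address_entities(entities, full_address):
--     address_parts = [part.strip() for part in full_address.split(',')]
--     matched_entities = []
--
--     current_part = 0
--     for entity in entities:
--         cleaned_text = entity['text'].strip().rstrip(',')
--         if current_part < len(address_parts) and cleaned_text == address_parts[current_part]:
--             matched_entities.append(entity)
--             current_part += 1
--
--     return matched_entities if current_part == len(address_parts) else []
-- ===== SOURCE B (Python) =====
-- def find_address_entities(entities, full_address):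
--     # B: two staged passes — first build an inverted index from cleaned entity
--     # text to the (ascending) list of positions holding it, then walk the parts
--     # picking from the index the earliest position past the previous pick.
--     index = {}
--     for i, entity in enumerate(entities):
--         index.setdefault(entity['text'].strip().rstrip(','), []).append((i, entity))
--     lo = 0
--     matched = []
--     for part in full_address.split(','):
--         hit = next((pe for pe in index.get(part.strip(), []) if pe[0] >= lo), None)
--         if hit is None:
--             return []
--         lo = hit[0] + 1
--         matched.append(hit[1])
--     return matched
-- ===== Notes on version B (the rewrite author's own statement) =====
-- stated objective: alternative
-- what changed: B replaces A's single fold over entities carrying a part counter by two staged passes: it first builds an inverted index mapping each cleaned entity text to its ascending list of positions, then walks the comma-split parts, picking from the index the earliest position past the previous pick.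
import Mathlib
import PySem

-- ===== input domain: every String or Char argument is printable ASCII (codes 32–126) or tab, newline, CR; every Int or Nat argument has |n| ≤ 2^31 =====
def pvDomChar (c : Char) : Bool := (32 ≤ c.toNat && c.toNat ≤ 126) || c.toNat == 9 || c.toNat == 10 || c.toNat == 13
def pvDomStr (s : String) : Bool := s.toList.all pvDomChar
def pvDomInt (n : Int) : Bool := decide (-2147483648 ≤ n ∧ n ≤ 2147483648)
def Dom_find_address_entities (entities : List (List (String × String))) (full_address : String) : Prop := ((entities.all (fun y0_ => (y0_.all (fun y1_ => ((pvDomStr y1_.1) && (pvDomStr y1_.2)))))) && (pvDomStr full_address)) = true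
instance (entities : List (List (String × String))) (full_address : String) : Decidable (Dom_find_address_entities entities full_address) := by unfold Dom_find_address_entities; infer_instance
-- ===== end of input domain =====

set_option maxHeartbeats 1000000


-- B replaces A's one fold over entities (with a part counter) by two staged passes:
-- build an inverted index cleaned-text -> positions, then walk the parts picking the
-- earliest indexed position past the previous pick (objective: alternative, same cost).

-- shared helpers (both Pythons use the identical expressions entity['text'] and
-- text.strip().rstrip(','))
-- entity['text'] on the association list: first match (none = KeyError, excluded by Pre_)
def pvGetText (e : List (String × String)) : Option String :=
  (e.find? (fun p => p.1 == "text")).map (·.2)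

-- hand port of s.rstrip(','): drop all trailing ',' characters (exact: only the
-- character ',' is stripped, from the right)
def pvRstripComma (s : String) : String :=
  String.mk (((s.toList.reverse).dropWhile (· == ',')).reverse)

-- entity['text'].strip().rstrip(',')
def pvClean (e : List (String × String)) : String :=
  pvRstripComma (PySem.Str.strip ((pvGetText e).getD ""))

-- ===== PORT A =====
def find_address_entities (entities : List (List (String × String))) (full_address : String) : List (List (String × String)) :=
  let address_parts := ((PySem.Str.split? full_address ",").getD []).map PySem.Str.strip
  let r := entities.foldl
    (fun (st : List (List (String × String)) × Nat) entity =>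
      let cleaned_text := pvClean entity
      if st.2 < address_parts.length ∧ cleaned_text = address_parts.getD st.2 "" then
        (st.1 ++ [entity], st.2 + 1)
      else st)
    ([], 0)
  if r.2 = address_parts.length then r.1 else []

-- ===== PORT B =====
-- pass 1: the inverted index — cleaned text -> list of (position, entity), built by
-- setdefault(...).append(...) over enumerate(entities)
def pvIndex (entities : List (List (String × String))) :
    PySem.Dict String (List (Int × List (String × String))) :=
  (PySem.List.enumerate entities 0).foldl
    (fun d ie => d.insert (pvClean ie.2) (d.getD (pvClean ie.2) [] ++ [ie]))
    PySem.Dict.empty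

-- pass 2: the loop over full_address.split(','); next(... if pe[0] >= lo) is find?;
-- none = B's early 'return []'
def pvSel (index : PySem.Dict String (List (Int × List (String × String))))
    (parts : List String) (lo : Int) : Option (List (List (String × String))) :=
  match parts with
  | [] => some []
  | p :: ps =>
    match (index.getD (PySem.Str.strip p) []).find? (fun pe => decide (lo ≤ pe.1)) with
    | none => none
    | some hit => (pvSel index ps (hit.1 + 1)).map (hit.2 :: ·)

def find_address_entities_alt (entities : List (List (String × String))) (full_address : String) : List (List (String × String)) :=
  (pvSel (pvIndex entities) ((PySem.Str.split? full_address ",").getD []) 0).getD []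

-- ===== PRECONDITION & SPEC =====
-- Pre_ excludes entities without a 'text' key, on which Python A raises KeyError.
def Pre_find_address_entities (entities : List (List (String × String))) (full_address : String) : Prop :=
  ∀ e ∈ entities, "text" ∈ e.map (·.1)
instance (entities : List (List (String × String))) (full_address : String) : Decidable (Pre_find_address_entities entities full_address) := by unfold Pre_find_address_entities; infer_instance

def pvWitness_find_address_entities : (List (List (String × String))) × String :=
  ([[("text", "12 Main St,")], [("text", "Springfield")]], "12 Main St, Springfield")

def Spec_find_address_entities (entities : List (List (String × String))) (full_address : String) (out : List (List (String × String))) : Prop := out = find_address_entities_alt entities full_address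
instance (entities : List (List (String × String))) (full_address : String) (out : List (List (String × String))) : Decidable (Spec_find_address_entities entities full_address out) := by unfold Spec_find_address_entities; infer_instance

-- ===== CLAIM (what is proved, stated in full; the proofs are below) =====
def Claim_equal_find_address_entities : Prop := ∀ (entities : List (List (String × String))) (full_address : String), Dom_find_address_entities entities full_address → Pre_find_address_entities entities full_address → Spec_find_address_entities entities full_address (find_address_entities entities full_address)

-- ===== LEMMAS AND PROOFS =====

-- proof-side intermediary: the sequential consume/advance formulation both ports are
-- reduced to.  pvConsume scans for the first entity whose cleaned text is the target,
-- returning it and the remaining entities; pvGo runs it over the parts.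
def pvConsume (rest : List (List (String × String))) (target : String) :
    Option (List (String × String) × List (List (String × String))) :=
  match rest with
  | [] => none
  | e :: rs => if pvClean e = target then some (e, rs) else pvConsume rs target

def pvGo (parts : List String) (rest : List (List (String × String))) :
    Option (List (List (String × String))) :=
  match parts with
  | [] => some []
  | p :: ps =>
    match pvConsume rest (PySem.Str.strip p) with
    | none => none
    | some (e, rs) => (pvGo ps rs).map (e :: ·)

-- ---- A's side: the fold equals pvGo ----

def pvStepA (raw : List String) (st : List (List (String × String)) × Nat)
    (entity : List (String × String)) : List (List (String × String)) × Nat :=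
  if st.2 < (raw.map PySem.Str.strip).length ∧
      pvClean entity = (raw.map PySem.Str.strip).getD st.2 "" then
    (st.1 ++ [entity], st.2 + 1)
  else st

theorem pvStepA_pos (raw : List String) {e : List (String × String)} {cp : Nat}
    (h : cp < raw.length) (hc : pvClean e = PySem.Str.strip raw[cp])
    (acc : List (List (String × String))) :
    pvStepA raw (acc, cp) e = (acc ++ [e], cp + 1) := by
  have hget : (raw.map PySem.Str.strip).getD cp "" = PySem.Str.strip raw[cp] := by
    simp [List.getD, List.getElem?_map, List.getElem?_eq_getElem h]
  unfold pvStepA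
  rw [if_pos ⟨by simpa using h, by rw [hget]; exact hc⟩]

theorem pvStepA_miss (raw : List String) {e : List (String × String)} {cp : Nat}
    (h : cp < raw.length) (hc : pvClean e ≠ PySem.Str.strip raw[cp])
    (acc : List (List (String × String))) :
    pvStepA raw (acc, cp) e = (acc, cp) := by
  have hget : (raw.map PySem.Str.strip).getD cp "" = PySem.Str.strip raw[cp] := by
    simp [List.getD, List.getElem?_map, List.getElem?_eq_getElem h]
  unfold pvStepA
  rw [if_neg (by rw [hget]; exact fun hh => hc hh.2)]

theorem pvStepA_done (raw : List String) {e : List (String × String)} {cp : Nat}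
    (h : raw.length ≤ cp) (acc : List (List (String × String))) :
    pvStepA raw (acc, cp) e = (acc, cp) := by
  unfold pvStepA
  rw [if_neg (by simp; omega)]

theorem pvMain (raw : List String) (rest : List (List (String × String))) :
    ∀ (acc : List (List (String × String))) (cp : Nat), cp ≤ raw.length →
    (match pvGo (raw.drop cp) rest with
     | some l => rest.foldl (pvStepA raw) (acc, cp) = (acc ++ l, raw.length)
     | none => (rest.foldl (pvStepA raw) (acc, cp)).2 ≠ raw.length) := by
  induction rest with
  | nil =>
    intro acc cp hcp
    rcases Nat.lt_or_ge cp raw.length with h | h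
    · rw [List.drop_eq_getElem_cons h]
      simp only [pvGo, pvConsume, List.foldl_nil]
      omega
    · have hcpe : cp = raw.length := le_antisymm hcp h
      rw [List.drop_eq_nil_of_le h]
      simp only [pvGo, List.foldl_nil, hcpe, List.append_nil]
  | cons e rs ih =>
    intro acc cp hcp
    rcases Nat.lt_or_ge cp raw.length with h | h
    · have hd : raw.drop cp = raw[cp] :: raw.drop (cp + 1) := List.drop_eq_getElem_cons h
      by_cases hc : pvClean e = PySem.Str.strip raw[cp]
      · rw [hd]
        simp only [pvGo, pvConsume]
        rw [if_pos hc]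
        have := ih (acc ++ [e]) (cp + 1) h
        cases hg : pvGo (raw.drop (cp + 1)) rs with
        | some l =>
          simp only [hg] at this
          simp only [hg, Option.map_some]
          rw [List.foldl_cons, pvStepA_pos raw h hc, this]
          simp
        | none =>
          simp only [hg] at this
          simp only [hg, Option.map_none]
          rw [List.foldl_cons, pvStepA_pos raw h hc]
          exact this
      · have hgo : pvGo (raw.drop cp) (e :: rs) = pvGo (raw.drop cp) rs := by
          rw [hd]; simp only [pvGo, pvConsume]; rw [if_neg hc]
        rw [hgo]
        have := ih acc cp hcp
        cases hg : pvGo (raw.drop cp) rs with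
        | some l =>
          simp only [hg] at this
          rw [List.foldl_cons, pvStepA_miss raw h hc]
          exact this
        | none =>
          simp only [hg] at this
          rw [List.foldl_cons, pvStepA_miss raw h hc]
          exact this
    · have hd : raw.drop cp = [] := List.drop_eq_nil_of_le h
      rw [hd]
      have := ih acc cp hcp
      rw [hd] at this
      simp only [pvGo] at this ⊢
      rw [List.foldl_cons, pvStepA_done raw h]
      exact this

-- ---- B's side: pvSel over the index equals pvGo ----

-- contents of the index: the filtered enumeration
theorem pvIndex_fold (ps : List (Int × List (String × String)))
    (d : PySem.Dict String (List (Int × List (String × String)))) (t : String) :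
    (ps.foldl (fun d ie => d.insert (pvClean ie.2) (d.getD (pvClean ie.2) [] ++ [ie])) d).getD t []
      = d.getD t [] ++ ps.filter (fun p => pvClean p.2 == t) := by
  induction ps generalizing d with
  | nil => simp
  | cons ie rest ih =>
    rw [List.foldl_cons, ih, PySem.Dict.getD_insert]
    by_cases h : pvClean ie.2 = t
    · rw [h, if_pos rfl, List.filter_cons_of_pos (by simp [h])]
      simp
    · rw [if_neg (fun hh => h hh.symm), List.filter_cons_of_neg (by simp [h])]

theorem pvIndex_getD (entities : List (List (String × String))) (t : String) :
    (pvIndex entities).getD t []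
      = (PySem.List.enumerate entities 0).filter (fun p => pvClean p.2 == t) := by
  unfold pvIndex
  rw [pvIndex_fold]
  simp [PySem.Dict.empty, PySem.Dict.getD, PySem.Dict.get?]

-- every index stored in the enumeration from k is ≥ k
theorem pvEnum_ge (es : List (List (String × String))) (k : Int) :
    ∀ p ∈ PySem.List.enumerate es k, k ≤ p.1 := by
  intro p hp
  rw [PySem.List.mem_enumerate_iff] at hp
  obtain ⟨i, hi, rfl⟩ := hp
  show k ≤ k + (i : Int)
  omega

-- find? with an everywhere-true predicate is head?
theorem pvFind_head {α : Type} (l : List α) (pred : α → Bool)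
    (h : ∀ x ∈ l, pred x = true) : l.find? pred = l.head? := by
  cases l with
  | nil => rfl
  | cons x xs => rw [List.find?_cons_of_pos (h x (by simp)), List.head?_cons]

-- skipping d positions: the find? with threshold k + d ignores the first d entries
theorem pvSkip (d : Nat) :
    ∀ (es : List (List (String × String))) (k : Int) (t : String),
    ((PySem.List.enumerate es k).filter (fun p => pvClean p.2 == t)).find?
        (fun pe => decide (k + d ≤ pe.1))
      = ((PySem.List.enumerate (es.drop d) (k + d)).filter (fun p => pvClean p.2 == t)).find?
        (fun pe => decide (k + d ≤ pe.1)) := by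
  induction d with
  | zero => intro es k t; simp
  | succ d ih =>
    intro es k t
    cases es with
    | nil => simp [PySem.List.enumerate_nil]
    | cons e rs =>
      rw [PySem.List.enumerate_cons, List.drop_succ_cons]
      by_cases hc : (pvClean e == t) = true
      · have hf : List.filter (fun q => pvClean q.2 == t)
            (((k, e) : Int × List (String × String)) :: PySem.List.enumerate rs (k + 1))
            = (k, e) :: List.filter (fun q => pvClean q.2 == t) (PySem.List.enumerate rs (k + 1)) := by
          simp [hc]
        rw [hf, List.find?_cons_of_neg (by simp)]
        have := ih rs (k + 1) t
        rw [show k + 1 + (d : Int) = k + ((d : Nat) + 1 : Nat) by push_cast; ring] at this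
        exact this
      · have hf : List.filter (fun q => pvClean q.2 == t)
            (((k, e) : Int × List (String × String)) :: PySem.List.enumerate rs (k + 1))
            = List.filter (fun q => pvClean q.2 == t) (PySem.List.enumerate rs (k + 1)) := by
          simp [hc]
        rw [hf]
        have := ih rs (k + 1) t
        rw [show k + 1 + (d : Int) = k + ((d : Nat) + 1 : Nat) by push_cast; ring] at this
        exact this

-- scanning from the front: head? of the filtered enumeration is pvConsume
theorem pvScan_none (es : List (List (String × String))) :
    ∀ (k : Int) (t : String), pvConsume es t = none →
    ((PySem.List.enumerate es k).filter (fun p => pvClean p.2 == t)).head? = none := by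
  induction es with
  | nil => intro k t _; simp [PySem.List.enumerate_nil]
  | cons e rs ih =>
    intro k t h
    rw [PySem.List.enumerate_cons]
    by_cases hc : pvClean e = t
    · simp [pvConsume, hc] at h
    · have hf : List.filter (fun q => pvClean q.2 == t)
          (((k, e) : Int × List (String × String)) :: PySem.List.enumerate rs (k + 1))
          = List.filter (fun q => pvClean q.2 == t) (PySem.List.enumerate rs (k + 1)) := by
        simp [hc]
      rw [hf]
      exact ih (k + 1) t (by simpa only [pvConsume, if_neg hc] using h)

theorem pvScan_some (es : List (List (String × String))) :
    ∀ (k : Int) (t : String) (e' : List (String × String)) (rs' : List (List (String × String))),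
    pvConsume es t = some (e', rs') →
    ∃ p : Nat, ((PySem.List.enumerate es k).filter (fun p => pvClean p.2 == t)).head?
        = some ((k + p : Int), e') ∧ rs' = es.drop (p + 1) := by
  induction es with
  | nil => intro k t e' rs' h; simp [pvConsume] at h
  | cons e rs ih =>
    intro k t e' rs' h
    rw [PySem.List.enumerate_cons]
    by_cases hc : pvClean e = t
    · simp only [pvConsume, if_pos hc, Option.some.injEq, Prod.mk.injEq] at h
      obtain ⟨he, hrs⟩ := h
      subst he; subst hrs
      refine ⟨0, ?_, by simp⟩
      have hf : List.filter (fun q => pvClean q.2 == t)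
          (((k, e) : Int × List (String × String)) :: PySem.List.enumerate rs (k + 1))
          = (k, e) :: List.filter (fun q => pvClean q.2 == t) (PySem.List.enumerate rs (k + 1)) := by
        simp [hc]
      rw [hf, List.head?_cons]
      simp
    · have hf : List.filter (fun q => pvClean q.2 == t)
          (((k, e) : Int × List (String × String)) :: PySem.List.enumerate rs (k + 1))
          = List.filter (fun q => pvClean q.2 == t) (PySem.List.enumerate rs (k + 1)) := by
        simp [hc]
      rw [hf]
      have h' : pvConsume rs t = some (e', rs') := by
        simpa only [pvConsume, if_neg hc] using h
      obtain ⟨p, h1, h2⟩ := ih (k + 1) t e' rs' h'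
      refine ⟨p + 1, ?_, by simpa using h2⟩
      have hcast : k + 1 + (p : Int) = k + ((p + 1 : Nat) : Int) := by push_cast; ring
      rw [h1, hcast]

-- combined: the indexed lookup at threshold j behaves as pvConsume on the suffix
theorem pvLookup (entities : List (List (String × String))) (j : Nat) (t : String) :
    (match pvConsume (entities.drop j) t with
     | none => ((pvIndex entities).getD t []).find? (fun pe => decide ((j : Int) ≤ pe.1)) = none
     | some (e, rs) => ∃ i : Nat,
        ((pvIndex entities).getD t []).find? (fun pe => decide ((j : Int) ≤ pe.1))
          = some ((i : Int), e) ∧ rs = entities.drop (i + 1) ∧ j ≤ i) := by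
  rw [pvIndex_getD]
  have hskip := pvSkip j entities 0 t
  rw [zero_add] at hskip
  have hall : ∀ p ∈ (PySem.List.enumerate (entities.drop j) (j : Int)).filter
      (fun p => pvClean p.2 == t), (fun pe => decide ((j : Int) ≤ pe.1)) p = true := by
    intro p hp
    have := pvEnum_ge (entities.drop j) (j : Int) p (List.mem_of_mem_filter hp)
    simpa using this
  have hhead := pvFind_head _ _ hall
  cases hg : pvConsume (entities.drop j) t with
  | none =>
    rw [hskip, hhead, pvScan_none (entities.drop j) (j : Int) t hg]
  | some pr =>
    obtain ⟨e, rs⟩ := pr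
    obtain ⟨p, h1, h2⟩ := pvScan_some (entities.drop j) (j : Int) t e rs hg
    refine ⟨j + p, ?_, ?_, by omega⟩
    · have hcast : ((j : Int) + p) = ((j + p : Nat) : Int) := by push_cast; ring
      rw [hskip, hhead, h1, hcast]
    · rw [h2, List.drop_drop, Nat.add_assoc]

theorem pvSel_eq_go (entities : List (List (String × String))) (parts : List String) :
    ∀ j : Nat, pvSel (pvIndex entities) parts (j : Int) = pvGo parts (entities.drop j) := by
  induction parts with
  | nil => intro j; simp [pvSel, pvGo]
  | cons p ps ih =>
    intro j
    simp only [pvSel, pvGo]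
    have := pvLookup entities j (PySem.Str.strip p)
    cases hg : pvConsume (entities.drop j) (PySem.Str.strip p) with
    | none =>
      simp only [hg] at this
      rw [this]
    | some pr =>
      obtain ⟨e, rs⟩ := pr
      simp only [hg] at this
      obtain ⟨i, h1, h2, _⟩ := this
      rw [h1]
      have hrec : pvSel (pvIndex entities) ps ((i : Int) + 1) = pvGo ps rs := by
        rw [h2, show (i : Int) + 1 = ((i + 1 : Nat) : Int) by push_cast; ring]
        exact ih (i + 1)
      simp only [hrec]

-- ===== VERDICT (by name: the statement is the Claim_ definition above) =====
theorem find_address_entities_spec : Claim_equal_find_address_entities := by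
  intro entities full_address _hdom _hpre
  unfold Spec_find_address_entities
  have hport : find_address_entities entities full_address =
      (if (entities.foldl (pvStepA ((PySem.Str.split? full_address ",").getD [])) ([], 0)).2 =
          (((PySem.Str.split? full_address ",").getD []).map PySem.Str.strip).length then
        (entities.foldl (pvStepA ((PySem.Str.split? full_address ",").getD [])) ([], 0)).1
      else []) := rfl
  rw [hport]
  unfold find_address_entities_alt
  have hB : pvSel (pvIndex entities) ((PySem.Str.split? full_address ",").getD []) 0
      = pvGo ((PySem.Str.split? full_address ",").getD []) entities := by
    have := pvSel_eq_go entities ((PySem.Str.split? full_address ",").getD []) 0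
    simpa using this
  rw [hB]
  have h := pvMain ((PySem.Str.split? full_address ",").getD []) entities [] 0 (Nat.zero_le _)
  rw [List.drop_zero] at h
  cases hg : pvGo ((PySem.Str.split? full_address ",").getD []) entities with
  | some l =>
    simp only [hg] at h
    rw [Option.getD_some, h]
    simp
  | none =>
    simp only [hg] at h
    rw [Option.getD_none, if_neg (by simpa using h)]
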